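-- pv_equiv track=rewrite | github.com/benclawbot/Pi-Agent-Optimus | evaluation/scripts/metrics.py | _count_tool_loops
-- ===== SOURCE A (Python) =====
-- from typing import Dict, Any, List, Optional
--
-- def _count_tool_loops(trace: List[Dict]) -> int:
--     """
--     Count tool call loops (read→write→read→write patterns).
--     Each loop = potential user feedback instance.
--     """
--     if not trace:
--         return 0
--
--     loops = 0
--     actions = []
--
--     for entry in trace:
--         if entry.get("type") == "tool_call":
--             name = entry.get("name", "").lower()
--             if name in ("read_file", "read"):
--                 actions.append("read")
--             elif name in ("write_file", "write", "patch"):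
--                 actions.append("write")
--             elif name in ("terminal", "process", "run"):
--                 actions.append("run")
--
--     # Count R-W-R-W patterns (loops)
--     for i in range(len(actions) - 3):
--         if (actions[i] == "read" and actions[i+1] == "write" and
--             actions[i+2] == "read" and actions[i+3] == "write"):
--             loops += 1
--
--     return loops
-- ===== SOURCE B (Python) =====
-- _CANON = {
--     "read_file": "read", "read": "read",
--     "write_file": "write", "write": "write", "patch": "write",
--     "terminal": "run", "process": "run", "run": "run",
-- }
--
-- def _count_tool_loops(trace):
--     """Single streaming pass: keep the last three actions in a sliding window
--     and count a loop each time the window plus the new action reads R-W-R-W."""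
--     loops = 0
--     w1 = w2 = w3 = None
--     for entry in trace:
--         if entry.get("type") == "tool_call":
--             act = _CANON.get(entry.get("name", "").lower())
--             if act is not None:
--                 if (w1, w2, w3, act) == ("read", "write", "read", "write"):
--                     loops += 1
--                 w1, w2, w3 = w2, w3, act
--     return loops
-- ===== Notes on version B (the rewrite author's own statement) =====
-- stated objective: alternative
-- what changed: Replaces A's two-phase build-a-list-then-index-scan with a single streaming pass that keeps only the last three canonical actions in a sliding window and counts R-W-R-W on the fly (O(1) extra space, no intermediate actions list).
import Mathlib
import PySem

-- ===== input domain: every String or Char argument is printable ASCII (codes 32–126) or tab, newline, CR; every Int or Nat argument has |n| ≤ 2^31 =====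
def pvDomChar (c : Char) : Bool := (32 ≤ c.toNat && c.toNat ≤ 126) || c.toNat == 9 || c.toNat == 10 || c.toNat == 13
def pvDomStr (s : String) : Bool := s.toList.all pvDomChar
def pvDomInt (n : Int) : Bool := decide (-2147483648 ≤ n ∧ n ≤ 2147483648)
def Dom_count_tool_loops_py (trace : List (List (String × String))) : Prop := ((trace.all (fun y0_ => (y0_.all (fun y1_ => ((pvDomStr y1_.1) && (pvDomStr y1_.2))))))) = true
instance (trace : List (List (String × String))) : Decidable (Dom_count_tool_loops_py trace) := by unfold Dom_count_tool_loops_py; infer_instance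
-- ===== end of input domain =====

-- B replaces A's build-an-actions-list-then-index-scan with a single streaming pass that keeps
-- only the last three canonical actions in a sliding window (alternative decomposition; return
-- values proved equal).

-- ===== PORT A =====
-- dicts are association lists; entry.get(k) = first match = get? on Dict.mk (exact for Python dicts)
def count_tool_loops_py (trace : List (List (String × String))) : Int :=
  if trace = [] then 0
  else
    let actions : List String := trace.foldl (fun acc entry =>
      if PySem.Dict.get? (PySem.Dict.mk entry) "type" = some "tool_call" then
        let name := PySem.Str.lower (PySem.Dict.getD (PySem.Dict.mk entry) "name" "")
        if name = "read_file" ∨ name = "read" then acc ++ ["read"]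
        else if name = "write_file" ∨ name = "write" ∨ name = "patch" then acc ++ ["write"]
        else if name = "terminal" ∨ name = "process" ∨ name = "run" then acc ++ ["run"]
        else acc
      else acc) []
    -- actions[i] … actions[i+3]: the loop indices are always in range, so pyGetD "" is exact
    (PySem.List.pyRange 0 ((actions.length : Int) - 3) 1).foldl
      (fun loops i =>
        if PySem.List.pyGetD actions i "" = "read" ∧ PySem.List.pyGetD actions (i+1) "" = "write" ∧
           PySem.List.pyGetD actions (i+2) "" = "read" ∧ PySem.List.pyGetD actions (i+3) "" = "write"
        then loops + 1 else loops) 0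

-- ===== PORT B =====
-- the module-level _CANON table of Source B
def pyCanon : PySem.Dict String String := PySem.Dict.ofList
  [("read_file","read"),("read","read"),("write_file","write"),("write","write"),("patch","write"),
   ("terminal","run"),("process","run"),("run","run")]

def count_tool_loops_py_alt (trace : List (List (String × String))) : Int :=
  (trace.foldl
    (fun (st : Int × Option String × Option String × Option String) entry =>
      if PySem.Dict.get? (PySem.Dict.mk entry) "type" = some "tool_call" then
        match PySem.Dict.get? pyCanon (PySem.Str.lower (PySem.Dict.getD (PySem.Dict.mk entry) "name" "")) with
        | some act =>
          (if st.2.1 = some "read" ∧ st.2.2.1 = some "write" ∧ st.2.2.2 = some "read" ∧ act = "write"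
            then st.1 + 1 else st.1, st.2.2.1, st.2.2.2, some act)
        | none => st
      else st)
    ((0 : Int), (none : Option String), (none : Option String), (none : Option String))).1

-- ===== PRECONDITION & SPEC =====
def Spec_count_tool_loops_py (trace : List (List (String × String))) (out : Int) : Prop := out = count_tool_loops_py_alt trace
instance (trace : List (List (String × String))) (out : Int) : Decidable (Spec_count_tool_loops_py trace out) := by unfold Spec_count_tool_loops_py; infer_instance

-- ===== CLAIM (what is proved, stated in full; the proofs are below) =====
def Claim_equal_count_tool_loops_py : Prop := ∀ (trace : List (List (String × String))), Dom_count_tool_loops_py trace → Spec_count_tool_loops_py trace (count_tool_loops_py trace)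

-- ===== LEMMAS AND PROOFS =====

-- the common classifier both loops implement: which canonical action (if any) an entry contributes
def clsEntry (entry : List (String × String)) : Option String :=
  if PySem.Dict.get? (PySem.Dict.mk entry) "type" = some "tool_call" then
    let name := PySem.Str.lower (PySem.Dict.getD (PySem.Dict.mk entry) "name" "")
    if name = "read_file" ∨ name = "read" then some "read"
    else if name = "write_file" ∨ name = "write" ∨ name = "patch" then some "write"
    else if name = "terminal" ∨ name = "process" ∨ name = "run" then some "run"
    else none
  else none

-- number of R-W-R-W windows in an action list (structural reference function)
def count4 : List String → Int
  | [] => 0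
  | a :: tl =>
    (match tl with
     | b :: c :: d :: _ => if a = "read" ∧ b = "write" ∧ c = "read" ∧ d = "write" then 1 else 0
     | _ => 0) + count4 tl

-- B's loop body, applied to a classified action
def stepS (st : Int × Option String × Option String × Option String) (act : String) :
    Int × Option String × Option String × Option String :=
  (if st.2.1 = some "read" ∧ st.2.2.1 = some "write" ∧ st.2.2.2 = some "read" ∧ act = "write"
    then st.1 + 1 else st.1, st.2.2.1, st.2.2.2, some act)

theorem canon_get (s : String) : PySem.Dict.get? pyCanon s =
    (if s = "read_file" ∨ s = "read" then some "read"
     else if s = "write_file" ∨ s = "write" ∨ s = "patch" then some "write"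
     else if s = "terminal" ∨ s = "process" ∨ s = "run" then some "run"
     else none) := by
  show PySem.Dict.get? (PySem.Dict.mk [("read_file","read"),("read","read"),("write_file","write"),
    ("write","write"),("patch","write"),("terminal","run"),("process","run"),("run","run")]) s = _
  simp [PySem.Dict.get?_mk_cons]
  split_ifs <;> (try subst_vars) <;> simp_all [PySem.Dict.get?, eq_comm]

-- A's first loop builds exactly the classified sublist
theorem foldA_eq (trace : List (List (String × String))) (acc : List String) :
    trace.foldl (fun acc entry =>
      if PySem.Dict.get? (PySem.Dict.mk entry) "type" = some "tool_call" then
        let name := PySem.Str.lower (PySem.Dict.getD (PySem.Dict.mk entry) "name" "")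
        if name = "read_file" ∨ name = "read" then acc ++ ["read"]
        else if name = "write_file" ∨ name = "write" ∨ name = "patch" then acc ++ ["write"]
        else if name = "terminal" ∨ name = "process" ∨ name = "run" then acc ++ ["run"]
        else acc
      else acc) acc = acc ++ trace.filterMap clsEntry := by
  induction trace generalizing acc with
  | nil => simp
  | cons e t ih =>
    have hstep : (if PySem.Dict.get? (PySem.Dict.mk e) "type" = some "tool_call" then
        let name := PySem.Str.lower (PySem.Dict.getD (PySem.Dict.mk e) "name" "")
        if name = "read_file" ∨ name = "read" then acc ++ ["read"]
        else if name = "write_file" ∨ name = "write" ∨ name = "patch" then acc ++ ["write"]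
        else if name = "terminal" ∨ name = "process" ∨ name = "run" then acc ++ ["run"]
        else acc
      else acc) = acc ++ (clsEntry e).toList := by
      simp only [clsEntry]; split_ifs <;> simp
    simp only [List.foldl_cons, hstep, ih, List.filterMap_cons]
    cases clsEntry e <;> simp

-- Nat-index form of A's counting loop
theorem cntNat_eq (l : List String) (n : Int) :
    (List.range (l.length - 3)).foldl
      (fun loops k =>
        if l.getD k "" = "read" ∧ l.getD (k+1) "" = "write" ∧
           l.getD (k+2) "" = "read" ∧ l.getD (k+3) "" = "write"
        then loops + 1 else loops) n = n + count4 l := by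
  induction l generalizing n with
  | nil => simp [count4]
  | cons a tl ih =>
    rcases tl with _ | ⟨b, _ | ⟨c, _ | ⟨d, rest⟩⟩⟩
    · simp [count4]
    · simp [count4]
    · simp [count4]
    · have hm : (a :: b :: c :: d :: rest).length - 3 = (rest.length) + 1 := by
        simp
      rw [hm, List.range_succ_eq_map, List.foldl_cons, List.foldl_map]
      have h0 : (if (a :: b :: c :: d :: rest).getD 0 "" = "read" ∧
            (a :: b :: c :: d :: rest).getD (0+1) "" = "write" ∧
            (a :: b :: c :: d :: rest).getD (0+2) "" = "read" ∧
            (a :: b :: c :: d :: rest).getD (0+3) "" = "write"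
          then n + 1 else n) =
          (if a = "read" ∧ b = "write" ∧ c = "read" ∧ d = "write" then n + 1 else n) := by
        simp [List.getD]
      rw [h0]
      have hfun : (fun (loops : Int) (k : Nat) =>
            if (a :: b :: c :: d :: rest).getD (k+1) "" = "read" ∧
               (a :: b :: c :: d :: rest).getD (k+1+1) "" = "write" ∧
               (a :: b :: c :: d :: rest).getD (k+1+2) "" = "read" ∧
               (a :: b :: c :: d :: rest).getD (k+1+3) "" = "write"
            then loops + 1 else loops) =
          (fun (loops : Int) (k : Nat) =>
            if (b :: c :: d :: rest).getD k "" = "read" ∧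
               (b :: c :: d :: rest).getD (k+1) "" = "write" ∧
               (b :: c :: d :: rest).getD (k+2) "" = "read" ∧
               (b :: c :: d :: rest).getD (k+3) "" = "write"
            then loops + 1 else loops) := by
        funext loops k
        have e2 : k + 1 + 1 = (k + 1) + 1 := rfl
        have e3 : k + 1 + 2 = (k + 2) + 1 := by omega
        have e4 : k + 1 + 3 = (k + 3) + 1 := by omega
        rw [e3, e4]
        simp
      simp only [Nat.succ_eq_add_one]
      rw [hfun]
      have hrest : (b :: c :: d :: rest).length - 3 = rest.length := by simp
      rw [← hrest, ih]
      have hc4 : count4 (a :: b :: c :: d :: rest) =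
          (if a = "read" ∧ b = "write" ∧ c = "read" ∧ d = "write" then (1:Int) else 0) +
          count4 (b :: c :: d :: rest) := by
        simp [count4]
      rw [hc4]
      split_ifs <;> omega

-- A's index loop counts the R-W-R-W windows
theorem loopA_eq (l : List String) (n : Int) :
    (PySem.List.pyRange 0 ((l.length : Int) - 3) 1).foldl
      (fun loops i =>
        if PySem.List.pyGetD l i "" = "read" ∧ PySem.List.pyGetD l (i+1) "" = "write" ∧
           PySem.List.pyGetD l (i+2) "" = "read" ∧ PySem.List.pyGetD l (i+3) "" = "write"
        then loops + 1 else loops) n = n + count4 l := by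
  rw [PySem.List.pyRange_one, List.foldl_map]
  have ht : (((l.length : Int) - 3) - 0).toNat = l.length - 3 := by omega
  rw [ht]
  have hfun : (fun (loops : Int) (k : Nat) =>
        if PySem.List.pyGetD l (0 + (k:Int)) "" = "read" ∧
           PySem.List.pyGetD l (0 + (k:Int) + 1) "" = "write" ∧
           PySem.List.pyGetD l (0 + (k:Int) + 2) "" = "read" ∧
           PySem.List.pyGetD l (0 + (k:Int) + 3) "" = "write"
        then loops + 1 else loops) =
      (fun (loops : Int) (k : Nat) =>
        if l.getD k "" = "read" ∧ l.getD (k+1) "" = "write" ∧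
           l.getD (k+2) "" = "read" ∧ l.getD (k+3) "" = "write"
        then loops + 1 else loops) := by
    funext loops k
    have e1 : (0:Int) + (k:Int) = ((k : Nat) : Int) := by ring
    have e2 : (k:Int) + 1 = ((k + 1 : Nat) : Int) := by push_cast; ring
    have e3 : (k:Int) + 2 = ((k + 2 : Nat) : Int) := by push_cast; ring
    have e4 : (k:Int) + 3 = ((k + 3 : Nat) : Int) := by push_cast; ring
    rw [e1, e2, e3, e4, PySem.List.pyGetD_natCast, PySem.List.pyGetD_natCast,
      PySem.List.pyGetD_natCast, PySem.List.pyGetD_natCast]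
  rw [hfun, cntNat_eq]

-- streaming invariant: a fully primed window counts the remaining windows
theorem stream3 (cs : List String) (n : Int) (a b c : String) :
    (cs.foldl stepS (n, some a, some b, some c)).1 = n + count4 (a :: b :: c :: cs) := by
  induction cs generalizing n a b c with
  | nil => simp [count4]
  | cons x cs' ih =>
    rw [List.foldl_cons]
    show (cs'.foldl stepS (stepS (n, some a, some b, some c) x)).1 = _
    rw [show stepS (n, some a, some b, some c) x =
        ((if a = "read" ∧ b = "write" ∧ c = "read" ∧ x = "write" then n + 1 else n),
         some b, some c, some x) by simp [stepS]]
    rw [ih]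
    have hc4 : count4 (a :: b :: c :: x :: cs') =
        (if a = "read" ∧ b = "write" ∧ c = "read" ∧ x = "write" then (1:Int) else 0) +
        count4 (b :: c :: x :: cs') := by
      simp [count4]
    rw [hc4]
    split_ifs <;> omega

theorem stream2 (cs : List String) (n : Int) (b c : String) :
    (cs.foldl stepS (n, none, some b, some c)).1 = n + count4 (b :: c :: cs) := by
  cases cs with
  | nil => simp [count4]
  | cons x cs' =>
    rw [List.foldl_cons]
    rw [show stepS (n, none, some b, some c) x = (n, some b, some c, some x) by simp [stepS]]
    rw [stream3]

theorem stream1 (cs : List String) (n : Int) (c : String) :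
    (cs.foldl stepS (n, none, none, some c)).1 = n + count4 (c :: cs) := by
  cases cs with
  | nil => simp [count4]
  | cons x cs' =>
    rw [List.foldl_cons]
    rw [show stepS (n, none, none, some c) x = (n, none, some c, some x) by simp [stepS]]
    rw [stream2]

theorem stream0 (cs : List String) (n : Int) :
    (cs.foldl stepS (n, none, none, none)).1 = n + count4 cs := by
  cases cs with
  | nil => simp [count4]
  | cons x cs' =>
    rw [List.foldl_cons]
    rw [show stepS (n, none, none, none) x = (n, none, none, some x) by simp [stepS]]
    rw [stream1]

-- B's fold over the trace is the stream over the classified actions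
theorem foldB_eq (trace : List (List (String × String)))
    (st : Int × Option String × Option String × Option String) :
    trace.foldl
      (fun (st : Int × Option String × Option String × Option String) entry =>
        if PySem.Dict.get? (PySem.Dict.mk entry) "type" = some "tool_call" then
          match PySem.Dict.get? pyCanon (PySem.Str.lower (PySem.Dict.getD (PySem.Dict.mk entry) "name" "")) with
          | some act =>
            (if st.2.1 = some "read" ∧ st.2.2.1 = some "write" ∧ st.2.2.2 = some "read" ∧ act = "write"
              then st.1 + 1 else st.1, st.2.2.1, st.2.2.2, some act)
          | none => st
        else st) st
      = (trace.filterMap clsEntry).foldl stepS st := by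
  induction trace generalizing st with
  | nil => simp
  | cons e t ih =>
    have hstep : (if PySem.Dict.get? (PySem.Dict.mk e) "type" = some "tool_call" then
        match PySem.Dict.get? pyCanon (PySem.Str.lower (PySem.Dict.getD (PySem.Dict.mk e) "name" "")) with
        | some act =>
          (if st.2.1 = some "read" ∧ st.2.2.1 = some "write" ∧ st.2.2.2 = some "read" ∧ act = "write"
            then st.1 + 1 else st.1, st.2.2.1, st.2.2.2, some act)
        | none => st
      else st) = (match clsEntry e with
        | some act => stepS st act
        | none => st) := by
      rw [canon_get]
      simp only [clsEntry, stepS]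
      split_ifs <;> rfl
    rw [List.foldl_cons, hstep, List.filterMap_cons]
    cases clsEntry e with
    | none => rw [ih]
    | some act => rw [ih, List.foldl_cons]

-- ===== VERDICT (by name: the statement is the Claim_ definition above) =====
theorem count_tool_loops_py_spec : Claim_equal_count_tool_loops_py := by
  intro trace _
  unfold Spec_count_tool_loops_py count_tool_loops_py count_tool_loops_py_alt
  rw [foldB_eq, stream0]
  cases trace with
  | nil => simp [count4]
  | cons e t =>
    rw [if_neg (by simp)]
    simp only [foldA_eq, List.nil_append, loopA_eq, zero_add]
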